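-- pv_equiv track=rewrite | github.com/Rohit-Pujari/Praxis-Motion-Intelligence | src/praxis_ai/analysis.py | infer_overall_condition
-- ===== SOURCE A (Python) =====
-- from typing import Dict, Iterable, List, Tuple
--
-- def infer_overall_condition(joint_status: Dict[str, str]) -> str:
--     counts = {
--         "Normal": sum(1 for value in joint_status.values() if value == "Normal"),
--         "Injury Recovery": sum(1 for value in joint_status.values() if value == "Injury Recovery"),
--         "Severe Limitation": sum(1 for value in joint_status.values() if value == "Severe Limitation"),
--     }
--     if counts["Severe Limitation"] >= 2:
--         return "Neurological Limitation"
--     if counts["Severe Limitation"] >= 1 or counts["Injury Recovery"] >= 2: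
--         return "Injury Recovery"
--     return "Normal"
-- ===== SOURCE B (Python) =====
-- # DFA over the value stream: no counters, no thresholds -- a transition table
-- # tracks just enough history (severe seen 0/1/2+, injuries 0/1/2+ while no severe)
-- # and a final table maps the end state to the verdict.
-- _TRANS = {
--     ("S0I0", "Severe Limitation"): "S1", ("S0I0", "Injury Recovery"): "S0I1",
--     ("S0I1", "Severe Limitation"): "S1", ("S0I1", "Injury Recovery"): "S0I2",
--     ("S0I2", "Severe Limitation"): "S1", ("S0I2", "Injury Recovery"): "S0I2",
--     ("S1", "Severe Limitation"): "S2", ("S1", "Injury Recovery"): "S1",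
--     ("S2", "Severe Limitation"): "S2", ("S2", "Injury Recovery"): "S2",
-- }
-- _FINAL = {
--     "S0I0": "Normal", "S0I1": "Normal",
--     "S0I2": "Injury Recovery", "S1": "Injury Recovery",
--     "S2": "Neurological Limitation",
-- }
--
-- def infer_overall_condition(joint_status):
--     state = "S0I0"
--     for value in joint_status.values():
--         state = _TRANS.get((state, value), state)
--     return _FINAL[state]
-- ===== Notes on version B (the rewrite author's own statement) =====
-- stated objective: alternative
-- what changed: Replaces A's three counting comprehensions plus threshold branches with a five-state finite automaton driven by a transition table over the value stream; the verdict is read from a final-state table, so no counts or threshold comparisons exist in B.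
import Mathlib
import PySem

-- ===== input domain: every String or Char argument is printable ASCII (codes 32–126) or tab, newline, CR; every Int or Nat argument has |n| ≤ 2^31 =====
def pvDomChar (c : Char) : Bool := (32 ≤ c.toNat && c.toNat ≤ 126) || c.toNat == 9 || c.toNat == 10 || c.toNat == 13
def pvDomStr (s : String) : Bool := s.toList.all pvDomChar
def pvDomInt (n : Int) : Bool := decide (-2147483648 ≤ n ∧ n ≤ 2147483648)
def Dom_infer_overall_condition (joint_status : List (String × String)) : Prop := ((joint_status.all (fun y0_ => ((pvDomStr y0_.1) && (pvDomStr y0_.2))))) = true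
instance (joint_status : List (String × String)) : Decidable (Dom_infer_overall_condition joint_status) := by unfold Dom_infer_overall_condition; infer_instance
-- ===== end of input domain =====

-- B replaces A's three counting comprehensions and threshold branches with a five-state
-- finite automaton: a transition table is folded over the values and a final-state table
-- gives the verdict; no counts or threshold comparisons appear in B.


-- ===== PORT A =====
-- counts = {"Normal": sum(...), "Injury Recovery": sum(...), "Severe Limitation": sum(...)}
-- The dict argument is an association list; duplicate keys are collapsed as Python's dict does
-- (PySem.Dict.ofList: first position, last value) before iterating .values().
def infer_overall_condition (joint_status : List (String × String)) : String :=
  let vs := (PySem.Dict.ofList joint_status).values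
  let counts : PySem.Dict String Int :=
    (((PySem.Dict.empty).insert "Normal"
        ((vs.map (fun value => if value = "Normal" then (1:Int) else 0)).sum)).insert "Injury Recovery"
        ((vs.map (fun value => if value = "Injury Recovery" then (1:Int) else 0)).sum)).insert "Severe Limitation"
        ((vs.map (fun value => if value = "Severe Limitation" then (1:Int) else 0)).sum)
  if counts.getD "Severe Limitation" 0 ≥ 2 then "Neurological Limitation"
  else if counts.getD "Severe Limitation" 0 ≥ 1 ∨ counts.getD "Injury Recovery" 0 ≥ 2 then "Injury Recovery"
  else "Normal"

-- ===== PORT B =====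
-- _TRANS / _FINAL tables of Source B
def pvTRANS : PySem.Dict (String × String) String :=
  PySem.Dict.ofList [
    (("S0I0", "Severe Limitation"), "S1"), (("S0I0", "Injury Recovery"), "S0I1"),
    (("S0I1", "Severe Limitation"), "S1"), (("S0I1", "Injury Recovery"), "S0I2"),
    (("S0I2", "Severe Limitation"), "S1"), (("S0I2", "Injury Recovery"), "S0I2"),
    (("S1", "Severe Limitation"), "S2"), (("S1", "Injury Recovery"), "S1"),
    (("S2", "Severe Limitation"), "S2"), (("S2", "Injury Recovery"), "S2")]
def pvFINAL : PySem.Dict String String :=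
  PySem.Dict.ofList [
    ("S0I0", "Normal"), ("S0I1", "Normal"),
    ("S0I2", "Injury Recovery"), ("S1", "Injury Recovery"),
    ("S2", "Neurological Limitation")]
-- _FINAL[state]: every reachable state is a key of _FINAL, so Python's [] never raises;
-- the "" default of getD is never used.
def infer_overall_condition_alt (joint_status : List (String × String)) : String :=
  let state := (PySem.Dict.ofList joint_status).values.foldl
    (fun st value => pvTRANS.getD (st, value) st) "S0I0"
  pvFINAL.getD state ""

-- ===== PRECONDITION & SPEC =====
def Spec_infer_overall_condition (joint_status : List (String × String)) (out : String) : Prop := out = infer_overall_condition_alt joint_status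
instance (joint_status : List (String × String)) (out : String) : Decidable (Spec_infer_overall_condition joint_status out) := by unfold Spec_infer_overall_condition; infer_instance

-- ===== CLAIM =====
def Claim_equal_infer_overall_condition : Prop := ∀ (joint_status : List (String × String)), Dom_infer_overall_condition joint_status → Spec_infer_overall_condition joint_status (infer_overall_condition joint_status)

-- ===== LEMMAS AND PROOFS =====

-- canonical DFA state holding the information (min(sev,2), inj cut at 2 and relevant only when sev = 0)
def pvStateOf (s i : Int) : String :=
  if 2 ≤ s then "S2" else if 1 ≤ s then "S1"
  else if 2 ≤ i then "S0I2" else if 1 ≤ i then "S0I1" else "S0I0"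

lemma pv_trans_other (st v : String) (h1 : v ≠ "Severe Limitation") (h2 : v ≠ "Injury Recovery") :
    pvTRANS.getD (st, v) st = st := by
  have hk : pvTRANS.keys = ["S0I0", "S0I1", "S0I2", "S1", "S2"].flatMap
      (fun st => [(st, "Severe Limitation"), (st, "Injury Recovery")]) := by decide
  have hn : pvTRANS.get? (st, v) = none := by
    rw [PySem.Dict.get?_eq_none_iff_not_mem_keys, hk]
    intro hmem
    simp [Prod.ext_iff] at hmem
    tauto
  rw [PySem.Dict.getD_eq_get?_getD, hn]; rfl

lemma pv_trans_sev (s i : Int) (hs : 0 ≤ s) (_hi : 0 ≤ i) :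
    pvTRANS.getD (pvStateOf s i, "Severe Limitation") (pvStateOf s i) = pvStateOf (s + 1) i := by
  unfold pvStateOf
  split_ifs <;> first | omega | decide

lemma pv_trans_inj (s i : Int) (_hs : 0 ≤ s) (hi : 0 ≤ i) :
    pvTRANS.getD (pvStateOf s i, "Injury Recovery") (pvStateOf s i) = pvStateOf s (i + 1) := by
  unfold pvStateOf
  split_ifs <;> first | omega | decide

lemma pv_dfa (vs : List String) (s i : Int) (hs : 0 ≤ s) (hi : 0 ≤ i) :
    vs.foldl (fun st value => pvTRANS.getD (st, value) st) (pvStateOf s i)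
    = pvStateOf (s + (vs.map (fun v => if v = "Severe Limitation" then (1:Int) else 0)).sum)
                (i + (vs.map (fun v => if v = "Injury Recovery" then (1:Int) else 0)).sum) := by
  induction vs generalizing s i with
  | nil => simp
  | cons v vs ih =>
    simp only [List.foldl_cons, List.map_cons, List.sum_cons]
    by_cases h1 : v = "Severe Limitation"
    · subst h1
      rw [pv_trans_sev s i hs hi, ih (s + 1) i (by omega) hi]
      simp; ring_nf
    · by_cases h2 : v = "Injury Recovery"
      · subst h2
        rw [pv_trans_inj s i hs hi, ih s (i + 1) hs (by omega)]
        simp [h1]; ring_nf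
      · rw [pv_trans_other _ v h1 h2, ih s i hs hi]
        simp [h1, h2]

lemma pv_final (s i : Int) :
    pvFINAL.getD (pvStateOf s i) ""
    = if 2 ≤ s then "Neurological Limitation"
      else if 1 ≤ s ∨ 2 ≤ i then "Injury Recovery" else "Normal" := by
  unfold pvStateOf
  split_ifs <;> first | omega | decide

-- ===== VERDICT =====
theorem infer_overall_condition_spec : Claim_equal_infer_overall_condition := by
  intro js _
  unfold Spec_infer_overall_condition infer_overall_condition infer_overall_condition_alt
  have h0 : ("S0I0" : String) = pvStateOf 0 0 := rfl
  rw [h0, pv_dfa _ 0 0 le_rfl le_rfl]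
  simp only [zero_add]
  rw [pv_final]
  simp [PySem.Dict.getD_eq_get?_getD, PySem.Dict.get?_insert_self,
        PySem.Dict.get?_insert_of_ne _ _ (by decide : "Injury Recovery" ≠ "Severe Limitation"),
        ge_iff_le]
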